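-- pv_equiv track=rewrite | github.com/ElliottSax/engineer | training_iterations/training_iteration122.py | count_palindrome_factorizations
-- ===== SOURCE A (Python) =====
-- def count_palindrome_factorizations(s):
--     """Count number of ways to factorize s into palindromes."""
--     n = len(s)
--     if n == 0:
--         return 1
--
--     # Precompute palindrome table
--     is_pal = [[False] * n for _ in range(n)]
--     for i in range(n):
--         is_pal[i][i] = True
--     for i in range(n - 1):
--         is_pal[i][i + 1] = s[i] == s[i + 1]
--     for length in range(3, n + 1):
--         for i in range(n - length + 1):
--             j = i + length - 1
--             is_pal[i][j] = s[i] == s[j] and is_pal[i + 1][j - 1]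
--
--     # DP: dp[i] = number of factorizations of s[0:i]
--     dp = [0] * (n + 1)
--     dp[0] = 1
--
--     for i in range(1, n + 1):
--         for j in range(i):
--             if is_pal[j][i - 1]:
--                 dp[i] += dp[j]
--
--     return dp[n]
-- ===== SOURCE B (Python) =====
-- def count_palindrome_factorizations(s):
--     """Count number of ways to factorize s into palindromes."""
--     dp = [1]
--     for i in range(1, len(s) + 1):
--         dp.append(sum(dp[j] for j in range(i) if s[j:i] == s[j:i][::-1]))
--     return dp[len(s)]
-- ===== Notes on version B (the rewrite author's own statement) =====
-- stated objective: simpler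
-- what changed: B drops A's precomputed n×n palindrome table (three table-filling loop nests) and instead builds the prefix-count list in one pass, testing each candidate block directly with s[j:i] == s[j:i][::-1]; O(n) extra space instead of O(n^2).
import Mathlib
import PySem

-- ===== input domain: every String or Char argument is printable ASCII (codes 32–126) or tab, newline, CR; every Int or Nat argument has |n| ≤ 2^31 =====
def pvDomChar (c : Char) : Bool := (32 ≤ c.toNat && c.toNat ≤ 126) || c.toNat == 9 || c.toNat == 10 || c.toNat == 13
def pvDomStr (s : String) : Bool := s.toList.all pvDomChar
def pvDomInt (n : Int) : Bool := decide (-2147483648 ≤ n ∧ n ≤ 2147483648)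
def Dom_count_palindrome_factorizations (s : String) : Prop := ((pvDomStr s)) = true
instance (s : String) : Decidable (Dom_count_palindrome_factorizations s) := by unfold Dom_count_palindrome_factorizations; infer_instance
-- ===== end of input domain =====

-- B replaces A's precomputed n×n palindrome table by direct slice-reversal checks inside a
-- single prefix DP built by appending; objective: simpler (no table, O(n) extra space).

-- ===== PORT A =====
-- A's 2D list is a List (List Bool); `is_pal[i][j]` reads and `is_pal[i][j] = v` writes are
-- List.getD / List.set (always in range in A); each loop is the fold over its range, in order.

/-- read `is_pal[i][j]` -/
def pvGet2 (t : List (List Bool)) (i j : Nat) : Bool := (t.getD i []).getD j false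

/-- write `is_pal[i][j] = v` -/
def pvSet2 (t : List (List Bool)) (i j : Nat) (v : Bool) : List (List Bool) :=
  t.set i ((t.getD i []).set j v)

/-- `is_pal = [[False] * n for _ in range(n)]` -/
def pvT0 (n : Nat) : List (List Bool) := List.replicate n (List.replicate n false)

/-- `for i in range(n): is_pal[i][i] = True` -/
def pvT1 (n : Nat) : List (List Bool) :=
  (List.range n).foldl (fun t i => pvSet2 t i i true) (pvT0 n)

/-- `for i in range(n-1): is_pal[i][i+1] = s[i] == s[i+1]` -/
def pvT2 (cs : List Char) (n : Nat) : List (List Bool) :=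
  (List.range (n - 1)).foldl
    (fun t i => pvSet2 t i (i + 1) (cs.getD i ' ' == cs.getD (i + 1) ' ')) (pvT1 n)

/-- inner loop of the length-`L` pass: `for i in range(n - L + 1): j = i + L - 1; is_pal[i][j] = s[i] == s[j] and is_pal[i+1][j-1]` (j inlined) -/
def pvInner (cs : List Char) (n L : Nat) (t : List (List Bool)) : List (List Bool) :=
  (List.range (n - L + 1)).foldl
    (fun t i =>
      pvSet2 t i (i + L - 1)
        ((cs.getD i ' ' == cs.getD (i + L - 1) ' ') && pvGet2 t (i + 1) (i + L - 1 - 1))) t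

/-- `for length in range(3, n+1): …` (range(3, n+1) is the n-2 values 3,…,n) -/
def pvT3 (cs : List Char) (n : Nat) : List (List Bool) :=
  (List.range' 3 (n - 2)).foldl (fun t L => pvInner cs n L t) (pvT2 cs n)

/-- `dp = [0]*(n+1); dp[0] = 1; for i in range(1, n+1): for j in range(i): if is_pal[j][i-1]: dp[i] += dp[j]` -/
def pvDpA (t : List (List Bool)) (n : Nat) : List Int :=
  (List.range' 1 n).foldl
    (fun dp i =>
      (List.range i).foldl
        (fun dp j => if pvGet2 t j (i - 1) then dp.set i (dp.getD i 0 + dp.getD j 0) else dp) dp)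
    ((List.replicate (n + 1) 0).set 0 1)

def count_palindrome_factorizations (s : String) : Int :=
  let cs := s.toList
  let n := cs.length
  if n = 0 then 1 else (pvDpA (pvT3 cs n) n).getD n 0

-- ===== PORT B =====
-- Source B: dp = [1]; for i in 1..len(s): dp.append(sum(dp[j] for j in range(i) if s[j:i] == s[j:i][::-1])); return dp[len(s)]
def count_palindrome_factorizations_alt (s : String) : Int :=
  let cs := s.toList
  let dp :=
    (List.range' 1 cs.length).foldl
      (fun dp i =>
        dp ++ [(List.range i).foldl
          (fun acc j =>
            if PySem.List.slice cs (some (Int.ofNat j)) (some (Int.ofNat i)) =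
                (PySem.List.slice cs (some (Int.ofNat j)) (some (Int.ofNat i))).reverse then
              acc + dp.getD j 0
            else acc) 0])
      [1]
  dp.getD cs.length 0

-- ===== PRECONDITION & SPEC =====
def Spec_count_palindrome_factorizations (s : String) (out : Int) : Prop := out = count_palindrome_factorizations_alt s
instance (s : String) (out : Int) : Decidable (Spec_count_palindrome_factorizations s out) := by unfold Spec_count_palindrome_factorizations; infer_instance

-- ===== CLAIM (what is proved, stated in full; the proofs are below) =====
def Claim_equal_count_palindrome_factorizations : Prop := ∀ (s : String), Dom_count_palindrome_factorizations s → Spec_count_palindrome_factorizations s (count_palindrome_factorizations s)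

-- ===== LEMMAS AND PROOFS =====

theorem getD_set {α : Type} (l : List α) (i k : Nat) (a d : α) :
    (l.set i a).getD k d = if k = i ∧ i < l.length then a else l.getD k d := by
  simp only [List.getD_eq_getElem?_getD, List.getElem?_set]
  split_ifs <;> simp_all

/-- the table is an n×n matrix -/
def pvShape (t : List (List Bool)) (n : Nat) : Prop :=
  t.length = n ∧ ∀ i, i < n → (t.getD i []).length = n

theorem shape_set2 {t : List (List Bool)} {n : Nat} (h : pvShape t n) (i j : Nat) (v : Bool) :
    pvShape (pvSet2 t i j v) n := by
  obtain ⟨hlen, hrow⟩ := h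
  refine ⟨by simp [pvSet2, hlen], ?_⟩
  intro k hk
  simp only [pvSet2]
  rw [getD_set]
  split_ifs with hcase
  · obtain ⟨hki, hil⟩ := hcase
    rw [List.length_set]
    exact hrow i (by omega)
  · exact hrow k hk

theorem get2_set2 {t : List (List Bool)} {n : Nat} (h : pvShape t n) {i j : Nat}
    (hi : i < n) (hj : j < n) (v : Bool) (i' j' : Nat) :
    pvGet2 (pvSet2 t i j v) i' j' = if i' = i ∧ j' = j then v else pvGet2 t i' j' := by
  obtain ⟨hlen, hrow⟩ := h
  simp only [pvGet2, pvSet2]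
  rw [getD_set]
  by_cases hii : i' = i
  · subst hii
    rw [if_pos ⟨rfl, by omega⟩]
    rw [getD_set]
    by_cases hjj : j' = j
    · subst hjj
      rw [if_pos ⟨rfl, by rw [hrow i' hi]; exact hj⟩, if_pos ⟨rfl, rfl⟩]
    · rw [if_neg (by tauto), if_neg (by tauto)]
  · rw [if_neg (by tauto), if_neg (by tauto)]

/-- two-pointer palindrome test for the segment cs[i..j] (both ends inclusive) -/
def palb (cs : List Char) (i j : Nat) : Bool :=
  if j ≤ i then true
  else (cs.getD i ' ' == cs.getD j ' ') && palb cs (i + 1) (j - 1)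
termination_by j - i
decreasing_by omega

theorem palb_lt (cs : List Char) {i j : Nat} (h : i < j) :
    palb cs i j = ((cs.getD i ' ' == cs.getD j ' ') && palb cs (i + 1) (j - 1)) := by
  rw [palb]; rw [if_neg (by omega)]

theorem palb_le (cs : List Char) {i j : Nat} (h : j ≤ i) : palb cs i j = true := by
  rw [palb]; rw [if_pos h]

/-- what the table should say once all passes of lengths ≤ L are done -/
def tblSpec (cs : List Char) (n L : Nat) : Nat → Nat → Bool :=
  fun i j => if i < n ∧ j < n ∧ i ≤ j ∧ j + 1 - i ≤ L then palb cs i j else false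

theorem pvT0_eq (n : Nat) :
    pvShape (pvT0 n) n ∧ ∀ i j, pvGet2 (pvT0 n) i j = false := by
  refine ⟨⟨by simp [pvT0], ?_⟩, ?_⟩
  · intro i hi
    simp [pvT0, List.getD_eq_getElem?_getD, hi]
  · intro i j
    simp only [pvGet2, pvT0, List.getD_eq_getElem?_getD, List.getElem?_replicate]
    split_ifs <;> simp

theorem pvT1_eq (n : Nat) :
    pvShape (pvT1 n) n ∧
      ∀ i j, pvGet2 (pvT1 n) i j = if i = j ∧ i < n then true else false := by
  unfold pvT1
  have main : ∀ m, m ≤ n →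
      pvShape ((List.range m).foldl (fun t i => pvSet2 t i i true) (pvT0 n)) n ∧
      ∀ i j, pvGet2 ((List.range m).foldl (fun t i => pvSet2 t i i true) (pvT0 n)) i j
        = if i = j ∧ i < m then true else false := by
    intro m
    induction m with
    | zero =>
      intro _
      simp only [List.range_zero, List.foldl_nil]
      obtain ⟨hs, hr⟩ := pvT0_eq n
      exact ⟨hs, fun i j => by rw [hr i j, if_neg (by omega)]⟩
    | succ m ih =>
      intro hm
      obtain ⟨ihs, ihr⟩ := ih (by omega)
      simp only [List.range_succ, List.foldl_append, List.foldl_cons, List.foldl_nil]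
      refine ⟨shape_set2 ihs _ _ _, ?_⟩
      intro i j
      rw [get2_set2 ihs (by omega) (by omega) true i j]
      by_cases h : i = m ∧ j = m
      · obtain ⟨hi, hj⟩ := h; subst hi; subst hj
        rw [if_pos ⟨rfl, rfl⟩, if_pos ⟨rfl, by omega⟩]
      · rw [if_neg h, ihr i j]
        split_ifs <;> first | rfl | omega
  exact main n (le_refl n)

theorem pvT2_eq (cs : List Char) (n : Nat) :
    pvShape (pvT2 cs n) n ∧
      ∀ i j, pvGet2 (pvT2 cs n) i j = tblSpec cs n 2 i j := by
  unfold pvT2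
  have main : ∀ m, m ≤ n - 1 →
      pvShape ((List.range m).foldl
        (fun t i => pvSet2 t i (i + 1) (cs.getD i ' ' == cs.getD (i + 1) ' ')) (pvT1 n)) n ∧
      ∀ i j, pvGet2 ((List.range m).foldl
          (fun t i => pvSet2 t i (i + 1) (cs.getD i ' ' == cs.getD (i + 1) ' ')) (pvT1 n)) i j
        = if j = i + 1 ∧ i < m then (cs.getD i ' ' == cs.getD (i + 1) ' ')
          else (if i = j ∧ i < n then true else false) := by
    intro m
    induction m with
    | zero =>
      intro _
      simp only [List.range_zero, List.foldl_nil]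
      obtain ⟨hs, hr⟩ := pvT1_eq n
      exact ⟨hs, fun i j => by rw [hr i j]; exact (if_neg (by omega)).symm⟩
    | succ m ih =>
      intro hm
      obtain ⟨ihs, ihr⟩ := ih (by omega)
      simp only [List.range_succ, List.foldl_append, List.foldl_cons, List.foldl_nil]
      refine ⟨shape_set2 ihs _ _ _, ?_⟩
      intro i j
      rw [get2_set2 ihs (by omega) (by omega) _ i j]
      by_cases h : i = m ∧ j = m + 1
      · obtain ⟨hi, hj⟩ := h; subst hi; subst hj
        rw [if_pos ⟨rfl, rfl⟩, if_pos ⟨rfl, by omega⟩]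
      · rw [if_neg h, ihr i j]
        split_ifs <;> first | rfl | omega
  obtain ⟨hs, hr⟩ := main (n - 1) (le_refl _)
  refine ⟨hs, ?_⟩
  intro i j
  rw [hr i j]
  simp only [tblSpec]
  by_cases h1 : j = i + 1 ∧ i < n - 1
  · obtain ⟨hj, hi⟩ := h1; subst hj
    rw [if_pos ⟨rfl, hi⟩, if_pos (by omega)]
    rw [palb_lt cs (by omega)]
    have e : i + 1 - 1 = i := by omega
    rw [e, palb_le cs (by omega), Bool.and_true]
  · rw [if_neg h1]
    by_cases h2 : i < n ∧ j < n ∧ i ≤ j ∧ j + 1 - i ≤ 2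
    · rw [if_pos h2]
      have hij : i = j := by omega
      subst hij
      rw [if_pos ⟨rfl, h2.1⟩, palb_le cs (le_refl i)]
    · rw [if_neg h2, if_neg (by omega)]

theorem pvInner_eq (cs : List Char) (n L : Nat) (h3 : 3 ≤ L) (hL : L ≤ n)
    (t : List (List Bool)) (hs : pvShape t n)
    (hr : ∀ i j, pvGet2 t i j = tblSpec cs n (L - 1) i j) :
    pvShape (pvInner cs n L t) n ∧
      ∀ i j, pvGet2 (pvInner cs n L t) i j = tblSpec cs n L i j := by
  unfold pvInner
  have main : ∀ m, m ≤ n - L + 1 →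
      pvShape ((List.range m).foldl
        (fun t i => pvSet2 t i (i + L - 1)
          ((cs.getD i ' ' == cs.getD (i + L - 1) ' ') && pvGet2 t (i + 1) (i + L - 1 - 1))) t) n ∧
      ∀ i j, pvGet2 ((List.range m).foldl
          (fun t i => pvSet2 t i (i + L - 1)
            ((cs.getD i ' ' == cs.getD (i + L - 1) ' ') && pvGet2 t (i + 1) (i + L - 1 - 1))) t) i j
        = if j = i + L - 1 ∧ i < m then palb cs i j else tblSpec cs n (L - 1) i j := by
    intro m
    induction m with
    | zero =>
      intro _
      simp only [List.range_zero, List.foldl_nil]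
      exact ⟨hs, fun i j => by rw [hr i j, if_neg (by omega)]⟩
    | succ m ih =>
      intro hm
      obtain ⟨ihs, ihr⟩ := ih (by omega)
      simp only [List.range_succ, List.foldl_append, List.foldl_cons, List.foldl_nil]
      rw [ihr (m + 1) (m + L - 1 - 1), if_neg (by omega)]
      have hread : tblSpec cs n (L - 1) (m + 1) (m + L - 1 - 1) = palb cs (m + 1) (m + L - 1 - 1) := by
        simp only [tblSpec]
        rw [if_pos (by omega)]
      have hval : palb cs m (m + L - 1)
          = ((cs.getD m ' ' == cs.getD (m + L - 1) ' ') && palb cs (m + 1) (m + L - 1 - 1)) := by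
        rw [palb_lt cs (by omega)]
      rw [hread, ← hval]
      refine ⟨shape_set2 ihs _ _ _, ?_⟩
      intro i j
      rw [get2_set2 ihs (by omega) (by omega) _ i j]
      by_cases h : i = m ∧ j = m + L - 1
      · obtain ⟨hi, hj⟩ := h; subst hi; subst hj
        rw [if_pos ⟨rfl, rfl⟩, if_pos ⟨rfl, by omega⟩]
      · rw [if_neg h, ihr i j]
        split_ifs <;> first | rfl | omega
  obtain ⟨hs2, hr2⟩ := main (n - L + 1) (le_refl _)
  refine ⟨hs2, ?_⟩
  intro i j
  rw [hr2 i j]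
  by_cases h1 : j = i + L - 1 ∧ i < n - L + 1
  · rw [if_pos h1]
    simp only [tblSpec]
    rw [if_pos (by omega)]
  · rw [if_neg h1]
    simp only [tblSpec]
    by_cases h2 : i < n ∧ j < n ∧ i ≤ j ∧ j + 1 - i ≤ L - 1
    · rw [if_pos h2, if_pos (by omega)]
    · rw [if_neg h2, if_neg (by omega)]

theorem pvT3_aux (cs : List Char) (n : Nat) :
    ∀ c, c ≤ n - 2 →
    pvShape ((List.range' 3 c).foldl (fun t L => pvInner cs n L t) (pvT2 cs n)) n ∧
      ∀ i j, pvGet2 ((List.range' 3 c).foldl (fun t L => pvInner cs n L t) (pvT2 cs n)) i j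
        = tblSpec cs n (2 + c) i j := by
  intro c
  induction c with
  | zero => intro _; simp only [List.range'_zero, List.foldl_nil]; exact pvT2_eq cs n
  | succ c ih =>
    intro hc
    obtain ⟨ihs, ihr⟩ := ih (by omega)
    rw [List.range'_concat]
    simp only [List.foldl_append, List.foldl_cons, List.foldl_nil, one_mul]
    have e1 : 2 + c = (3 + c) - 1 := by omega
    rw [e1] at ihr
    obtain ⟨hs2, hr2⟩ := pvInner_eq cs n (3 + c) (by omega) (by omega) _ ihs ihr
    have e2 : 2 + (c + 1) = 3 + c := by omega
    rw [e2]
    exact ⟨hs2, hr2⟩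

theorem pvT3_eq (cs : List Char) (n : Nat) {i j : Nat}
    (hij : i ≤ j) (hj : j < n) : pvGet2 (pvT3 cs n) i j = palb cs i j := by
  unfold pvT3
  rw [(pvT3_aux cs n (n - 2) (le_refl _)).2 i j]
  simp only [tblSpec]
  rw [if_pos (by omega)]

theorem pal_cons_append (a b : Char) (m : List Char) :
    ((a :: (m ++ [b])) = (a :: (m ++ [b])).reverse) ↔ (a = b ∧ m = m.reverse) := by
  rw [List.reverse_cons, List.reverse_append, List.reverse_singleton]
  constructor
  · intro h
    have h'' : a :: (m ++ [b]) = b :: (m.reverse ++ [a]) := by simpa using h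
    injection h'' with h1 h2
    subst h1
    exact ⟨rfl, List.append_cancel_right h2⟩
  · rintro ⟨rfl, hm⟩
    simp [← hm]

theorem palb_slice (cs : List Char) :
    ∀ d i j, j - i = d → i ≤ j → j < cs.length →
    palb cs i j
      = decide (((cs.drop i).take (j + 1 - i)) = ((cs.drop i).take (j + 1 - i)).reverse) := by
  intro d
  induction d using Nat.strong_induction_on with
  | _ d ih =>
    intro i j hd hij hj
    by_cases heq : i = j
    · subst heq
      have hi : i < cs.length := hj
      have e : i + 1 - i = 1 := by omega
      rw [palb_le cs (le_refl i), e, List.drop_eq_getElem_cons hi]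
      have ht : List.take 1 (cs[i] :: List.drop (i + 1) cs) = [cs[i]] := rfl
      rw [ht]
      simp
    · have hlt : i < j := by omega
      have hi : i < cs.length := by omega
      rw [palb_lt cs hlt]
      have hseg : (cs.drop i).take (j + 1 - i)
          = cs[i] :: (((cs.drop (i + 1)).take (j - i - 1)) ++ [cs[j]]) := by
        rw [List.drop_eq_getElem_cons hi]
        have e1 : j + 1 - i = (j - i - 1 + 1) + 1 := by omega
        rw [e1, List.take_succ_cons, List.take_add_one]
        congr 1
        rw [List.getElem?_drop]
        have e2 : i + 1 + (j - i - 1) = j := by omega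
        rw [e2, List.getElem?_eq_getElem hj]
        rfl
      have hA : (cs.getD i ' ' == cs.getD j ' ') = decide (cs[i] = cs[j]) := by
        rw [List.getD_eq_getElem cs ' ' hi, List.getD_eq_getElem cs ' ' hj]
        by_cases hc : cs[i] = cs[j] <;> simp [hc]
      have hB : palb cs (i + 1) (j - 1)
          = decide ((cs.drop (i + 1)).take (j - i - 1) = ((cs.drop (i + 1)).take (j - i - 1)).reverse) := by
        by_cases hj1 : i + 1 ≤ j - 1
        · have := ih (j - 1 - (i + 1)) (by omega) (i + 1) (j - 1) rfl hj1 (by omega)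
          rw [this]
          have e3 : j - 1 + 1 - (i + 1) = j - i - 1 := by omega
          rw [e3]
        · have hji : j = i + 1 := by omega
          subst hji
          have e4 : i + 1 - 1 = i := by omega
          have e5 : i + 1 - i - 1 = 0 := by omega
          rw [e4, e5, palb_le cs (by omega)]
          simp
      have hand : ∀ (p q : Prop) [Decidable p] [Decidable q],
          (decide p && decide q) = decide (p ∧ q) := by
        intro p q _ _
        by_cases hp : p <;> by_cases hq : q <;> simp [hp, hq]
      rw [hseg, hA, hB, hand]
      exact decide_eq_decide.mpr (pal_cons_append cs[i] cs[j] _).symm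

theorem innerA_eq (cond : Nat → Bool) :
    ∀ (l : List Nat) (dp : List Int) (i : Nat), (∀ j ∈ l, j < i) → i < dp.length →
    (l.foldl (fun d j => if cond j then d.set i (d.getD i 0 + d.getD j 0) else d) dp).length
        = dp.length ∧
      ∀ k, (l.foldl (fun d j => if cond j then d.set i (d.getD i 0 + d.getD j 0) else d) dp).getD k 0
        = if k = i then dp.getD i 0 + (l.map (fun j => if cond j then dp.getD j 0 else 0)).sum
          else dp.getD k 0 := by
  intro l
  induction l with
  | nil =>
    intro dp i _ _
    refine ⟨rfl, fun k => ?_⟩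
    simp only [List.foldl_nil, List.map_nil, List.sum_nil, add_zero]
    by_cases hk : k = i
    · rw [if_pos hk, hk]
    · rw [if_neg hk]
  | cons a l ih =>
    intro dp i h hi
    have ha : a < i := h a (by simp)
    simp only [List.foldl_cons, List.map_cons, List.sum_cons]
    by_cases hca : cond a = true
    · rw [if_pos hca]
      obtain ⟨ihl, ihk⟩ := ih (dp.set i (dp.getD i 0 + dp.getD a 0)) i
        (fun j hj => h j (by simp [hj])) (by rw [List.length_set]; exact hi)
      have hgi : (dp.set i (dp.getD i 0 + dp.getD a 0)).getD i 0 = dp.getD i 0 + dp.getD a 0 := by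
        rw [getD_set]; rw [if_pos ⟨rfl, hi⟩]
      have hgo : ∀ j, j ≠ i → (dp.set i (dp.getD i 0 + dp.getD a 0)).getD j 0 = dp.getD j 0 := by
        intro j hj
        rw [getD_set, if_neg (by tauto)]
      have hmap : (l.map (fun j => if cond j then (dp.set i (dp.getD i 0 + dp.getD a 0)).getD j 0 else 0))
          = l.map (fun j => if cond j then dp.getD j 0 else 0) := by
        apply List.map_congr_left
        intro j hj
        have hji : j < i := h j (by simp [hj])
        by_cases hcj : cond j = true
        · rw [if_pos hcj, if_pos hcj, hgo j (by omega)]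
        · rw [if_neg hcj, if_neg hcj]
      refine ⟨ihl.trans (by rw [List.length_set]), fun k => ?_⟩
      rw [ihk k]
      by_cases hk : k = i
      · rw [if_pos hk, if_pos hk, hgi, hmap, if_pos hca]
        ring
      · rw [if_neg hk, if_neg hk, hgo k hk]
    · rw [if_neg hca]
      obtain ⟨ihl, ihk⟩ := ih dp i (fun j hj => h j (by simp [hj])) hi
      refine ⟨ihl, fun k => ?_⟩
      rw [ihk k]
      by_cases hk : k = i
      · rw [if_pos hk, if_pos hk, if_neg hca]
        ring
      · rw [if_neg hk, if_neg hk]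

theorem foldl_ite_add {p : Nat → Prop} [DecidablePred p] (v : Nat → Int) :
    ∀ (l : List Nat) (init : Int),
    l.foldl (fun acc j => if p j then acc + v j else acc) init
      = init + (l.map (fun j => if p j then v j else 0)).sum := by
  intro l
  induction l with
  | nil => intro init; simp
  | cons a l ih =>
    intro init
    simp only [List.foldl_cons, List.map_cons, List.sum_cons]
    rw [ih]
    split_ifs <;> ring

/-- proof-only name for B's loop body -/
def pvStepB (cs : List Char) (dp : List Int) (i : Nat) : List Int :=
  dp ++ [(List.range i).foldl
    (fun acc j =>
      if PySem.List.slice cs (some (Int.ofNat j)) (some (Int.ofNat i)) =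
          (PySem.List.slice cs (some (Int.ofNat j)) (some (Int.ofNat i))).reverse then
        acc + dp.getD j 0
      else acc) 0]

/-- B's dp list after the first m outer iterations -/
def pvB (cs : List Char) (m : Nat) : List Int :=
  (List.range' 1 m).foldl (pvStepB cs) [1]

/-- A's dp list after the first m outer iterations -/
def pvA (cs : List Char) (n m : Nat) : List Int :=
  (List.range' 1 m).foldl
    (fun dp i =>
      (List.range i).foldl
        (fun dp j => if pvGet2 (pvT3 cs n) j (i - 1) then dp.set i (dp.getD i 0 + dp.getD j 0) else dp) dp)
    ((List.replicate (n + 1) 0).set 0 1)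

theorem cond_eq (cs : List Char) (n : Nat) (hn : n = cs.length) {j i : Nat}
    (hji : j < i) (hi : i ≤ n) :
    pvGet2 (pvT3 cs n) j (i - 1)
      = decide (PySem.List.slice cs (some (Int.ofNat j)) (some (Int.ofNat i)) =
          (PySem.List.slice cs (some (Int.ofNat j)) (some (Int.ofNat i))).reverse) := by
  rw [pvT3_eq cs n (by omega) (by omega)]
  rw [palb_slice cs ((i - 1) - j) j (i - 1) rfl (by omega) (by omega)]
  rw [Int.ofNat_eq_natCast, Int.ofNat_eq_natCast, PySem.List.slice_natCast]
  have e : (i - 1) + 1 - j = i - j := by omega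
  rw [e]

theorem dp_outer (cs : List Char) (n : Nat) (hn : n = cs.length) :
    ∀ m, m ≤ n →
    (pvA cs n m).length = n + 1 ∧ (pvB cs m).length = m + 1 ∧
      ∀ k, (pvA cs n m).getD k 0 = if k ≤ m then (pvB cs m).getD k 0 else 0 := by
  intro m
  induction m with
  | zero =>
    intro _
    refine ⟨by simp [pvA], rfl, ?_⟩
    intro k
    simp only [pvA, pvB, List.range'_zero, List.foldl_nil]
    rw [getD_set]
    by_cases hk : k = 0
    · subst hk; rw [if_pos ⟨rfl, by simp⟩, if_pos (le_refl 0)]; rfl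
    · rw [if_neg (by simp; omega), if_neg (by omega)]
      simp [List.getD_eq_getElem?_getD, List.getElem?_replicate]
      split_ifs <;> rfl
  | succ m ih =>
    intro hm
    obtain ⟨ihalen, ihlen, ihk⟩ := ih (by omega)
    have hrng : List.range' 1 (m + 1) = List.range' 1 m ++ [1 + m] := by
      rw [List.range'_concat]; simp
    have hAstep : pvA cs n (m + 1)
        = (List.range (1 + m)).foldl
            (fun dp j => if pvGet2 (pvT3 cs n) j (1 + m - 1) then
                dp.set (1 + m) (dp.getD (1 + m) 0 + dp.getD j 0) else dp)
            (pvA cs n m) := by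
      unfold pvA
      rw [hrng, List.foldl_append]
      simp only [List.foldl_cons, List.foldl_nil]
    have hBstep : pvB cs (m + 1) = pvStepB cs (pvB cs m) (1 + m) := by
      unfold pvB
      rw [hrng, List.foldl_append]
      simp only [List.foldl_cons, List.foldl_nil]
    set v := (List.range (1 + m)).foldl
      (fun acc j =>
        if PySem.List.slice cs (some (Int.ofNat j)) (some (Int.ofNat (1 + m))) =
            (PySem.List.slice cs (some (Int.ofNat j)) (some (Int.ofNat (1 + m)))).reverse then
          acc + (pvB cs m).getD j 0
        else acc) 0 with hv
    have hBval : pvB cs (m + 1) = pvB cs m ++ [v] := by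
      rw [hBstep, hv]; rfl
    have hlen : (pvB cs (m + 1)).length = (m + 1) + 1 := by
      rw [hBval]; simp [ihlen]
    obtain ⟨hAl, hAk⟩ := innerA_eq (fun j => pvGet2 (pvT3 cs n) j (1 + m - 1))
      (List.range (1 + m)) (pvA cs n m) (1 + m)
      (fun j hj => by simpa using List.mem_range.mp hj) (by rw [ihalen]; omega)
    have hsum :
        ((List.range (1 + m)).map
          (fun j => if pvGet2 (pvT3 cs n) j (1 + m - 1) then (pvA cs n m).getD j 0 else 0)).sum = v := by
      rw [hv, foldl_ite_add, zero_add]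
      congr 1
      apply List.map_congr_left
      intro j hj
      have hjm : j ≤ m := by have := List.mem_range.mp hj; omega
      rw [cond_eq cs n hn (show j < 1 + m by omega) (show 1 + m ≤ n by omega)]
      have hdp : (pvA cs n m).getD j 0 = (pvB cs m).getD j 0 := by
        rw [ihk j, if_pos hjm]
      rw [hdp]
      simp
    refine ⟨?_, hlen, ?_⟩
    · rw [hAstep, hAl, ihalen]
    intro k
    rw [hAstep, hAk k]
    by_cases hk : k = 1 + m
    · subst hk
      rw [if_pos rfl, ihk (1 + m), if_neg (by omega), zero_add, hsum]
      rw [if_pos (by omega), hBval, List.getD_append_right _ _ _ _ (by rw [ihlen]; omega)]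
      rw [ihlen]
      have e4 : 1 + m - (m + 1) = 0 := by omega
      rw [e4]
      rfl
    · rw [if_neg hk, ihk k]
      by_cases hk2 : k ≤ m
      · rw [if_pos hk2, if_pos (by omega), hBval,
          List.getD_append _ _ _ _ (by rw [ihlen]; omega)]
      · rw [if_neg hk2, if_neg (by omega)]

-- ===== VERDICT (by name: the statement is the Claim_ definition above) =====
theorem count_palindrome_factorizations_spec : Claim_equal_count_palindrome_factorizations := by
  intro s _
  show count_palindrome_factorizations s = count_palindrome_factorizations_alt s
  show (if s.toList.length = 0 then (1 : Int)
        else (pvDpA (pvT3 s.toList s.toList.length) s.toList.length).getD s.toList.length 0)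
      = (pvB s.toList s.toList.length).getD s.toList.length 0
  by_cases h0 : s.toList.length = 0
  · rw [if_pos h0, h0]
    rfl
  · rw [if_neg h0]
    have hA : pvDpA (pvT3 s.toList s.toList.length) s.toList.length
        = pvA s.toList s.toList.length s.toList.length := rfl
    rw [hA]
    obtain ⟨_, _, hk⟩ := dp_outer s.toList s.toList.length rfl s.toList.length (le_refl _)
    rw [hk, if_pos (le_refl _)]
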